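-- pv_equiv track=rewrite | github.com/christianebacani/Roadmap | Coding Challenges using Python and SQL/Code Wars Python Solved Problems/6 Kyu/simple_sentences.py | make_sentences
-- ===== SOURCE A (Python) =====
-- def make_sentences(parts: list[str]) -> str:
--     result = []
--
--     for i in range(len(parts)):
--         if parts[i] != ',':
--             result.append(parts[i])
--             result.append(' ')
--             continue
--
--         if result[-1] == ' ':
--             result[-1] = ','
--             result.append(' ')
--
--         else:
--             result.append(',')
--             result.append(' ')
--
--     result = ''.join(result)
--     formatted_result = ''
--
--     for i in range(len(result)):
--         if result[i] == '.':
--             continue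
--
--         formatted_result += result[i]
--
--     formatted_result = formatted_result.strip()
--     return formatted_result + '.'
-- ===== SOURCE B (Python) =====
-- def make_sentences(parts: list[str]) -> str:
--     words = []
--     for part in parts:
--         if part == ',':
--             words[-1] = words[-1] + ','
--         else:
--             words.append(part)
--     return ' '.join(words).replace('.', '').strip() + '.'
-- ===== Notes on version B (the rewrite author's own statement) =====
-- stated objective: simpler
-- what changed: B keeps a list of word tokens and merges each ',' onto the previous word, then joins with spaces and strips dots with one .replace, instead of A's flat piece-list with trailing-space surgery (result[-1] swap) followed by a character-copy loop to delete dots.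
import Mathlib
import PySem

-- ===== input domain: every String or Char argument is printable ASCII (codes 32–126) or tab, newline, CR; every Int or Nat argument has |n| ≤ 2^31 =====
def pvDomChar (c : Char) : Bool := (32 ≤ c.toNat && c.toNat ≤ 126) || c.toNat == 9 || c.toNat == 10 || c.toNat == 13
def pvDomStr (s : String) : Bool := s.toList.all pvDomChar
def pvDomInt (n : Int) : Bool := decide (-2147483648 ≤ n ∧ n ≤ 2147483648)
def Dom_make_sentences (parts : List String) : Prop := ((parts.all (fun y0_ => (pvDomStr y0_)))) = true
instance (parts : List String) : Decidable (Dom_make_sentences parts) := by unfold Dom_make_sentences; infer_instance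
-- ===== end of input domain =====

-- B rebuilds the sentence from word tokens (merging each ',' onto the previous word) and does the
-- dot removal with one .replace instead of A's flat char/space list surgery and char-copy loop: simpler.

-- ===== PORT A =====
-- A's loop body, step for step; result[-1] read/write via pyGetD/pySetD (exact under Pre_,
-- where result is nonempty whenever a ',' part is processed).
def pvStepA (result : List String) (p : String) : List String :=
  if p ≠ "," then result ++ [p] ++ [" "]
  else if PySem.List.pyGetD result (-1) "" = " " then
    PySem.List.pySetD result (-1) "," ++ [" "]
  else result ++ [","] ++ [" "]

-- second loop, strip and '+ "."' are done on List Char (a Python str is exactly its char sequence)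
def make_sentences (parts : List String) : String :=
  let result := parts.foldl pvStepA []
  let joined := PySem.Str.join "" result
  let formatted := joined.toList.foldl (fun acc c => if c = '.' then acc else acc ++ [c]) []
  String.ofList (PySem.Chars.strip formatted ++ ['.'])

-- ===== PORT B =====
-- B's loop body: words[-1] = words[-1] + ',' via pyGetD/pySetD (exact under Pre_).
def pvStepB (words : List String) (p : String) : List String :=
  if p = "," then
    PySem.List.pySetD words (-1) (PySem.List.pyGetD words (-1) "" ++ ",")
  else words ++ [p]

def make_sentences_alt (parts : List String) : String :=
  let words := parts.foldl pvStepB []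
  String.ofList
    ((PySem.Str.strip (PySem.Str.replace (PySem.Str.join " " words) "." "")).toList ++ ['.'])

-- ===== PRECONDITION & SPEC =====
-- A raises IndexError (result[-1] on the still-empty list) exactly when parts starts with ',';
-- B raises there too (words[-1] on an empty list). Nothing else is excluded.
def Pre_make_sentences (parts : List String) : Prop := parts.head? ≠ some ","
instance (parts : List String) : Decidable (Pre_make_sentences parts) := by
  unfold Pre_make_sentences; infer_instance

def pvWitness_make_sentences : List String := ["hello", ",", "world."]

def Spec_make_sentences (parts : List String) (out : String) : Prop := out = make_sentences_alt parts
instance (parts : List String) (out : String) : Decidable (Spec_make_sentences parts out) := by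
  unfold Spec_make_sentences; infer_instance

-- ===== CLAIM (what is proved, stated in full; the proofs are below) =====
def Claim_equal_make_sentences : Prop := ∀ (parts : List String), Dom_make_sentences parts → Pre_make_sentences parts → Spec_make_sentences parts (make_sentences parts)

-- ===== LEMMAS AND PROOFS =====

-- concatenation of A's result pieces / B's space-joined words, at the char level
def pvCat (res : List String) : List Char := PySem.Chars.join [] (res.map String.toList)
def pvJoinW (ws : List String) : List Char := PySem.Chars.join [' '] (ws.map String.toList)

lemma pvCat_append (res : List String) (x : String) :
    pvCat (res ++ [x]) = pvCat res ++ x.toList := by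
  unfold pvCat
  induction res with
  | nil => simp [PySem.Chars.join_nil, PySem.Chars.join_singleton]
  | cons a t ih =>
    cases t with
    | nil => simp [PySem.Chars.join_singleton, PySem.Chars.join_cons_cons]
    | cons b u =>
      simp only [List.cons_append, List.map_cons, PySem.Chars.join_cons_cons] at *
      simpa using ih

lemma pvJoinW_append (ws : List String) (p : String) (h : ws ≠ []) :
    pvJoinW (ws ++ [p]) = pvJoinW ws ++ [' '] ++ p.toList := by
  unfold pvJoinW
  induction ws with
  | nil => exact absurd rfl h
  | cons a t ih =>
    cases t with
    | nil => simp [PySem.Chars.join_singleton, PySem.Chars.join_cons_cons]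
    | cons b u =>
      have hih := ih (by simp)
      simp only [List.cons_append, List.map_cons, List.map_append,
        PySem.Chars.join_cons_cons] at hih ⊢
      simpa using hih

lemma pvSetD_last {α : Type} (xs : List α) (x v : α) :
    PySem.List.pySetD (xs ++ [x]) (-1) v = xs ++ [v] := by
  simp [PySem.List.pySetD, PySem.List.pySet?, PySem.List.pyIdx?]

-- B's comma step glues ',' onto the last word: effect on the space-join
lemma pvJoinW_comma (qs : List String) (w : String) :
    pvJoinW (qs ++ [w ++ ","]) = pvJoinW (qs ++ [w]) ++ [','] := by
  cases qs with
  | nil =>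
    unfold pvJoinW
    simp [PySem.Chars.join_singleton, String.toList_append]
  | cons a t =>
    rw [pvJoinW_append _ _ (by simp), pvJoinW_append _ _ (by simp), String.toList_append]
    simp

-- loop invariant: A's flat result is B's joined words followed by one trailing space
lemma pv_loop_inv (rest : List String) :
    ∀ (res ws : List String), ws ≠ [] → (∃ rs, res = rs ++ [" "]) →
    pvCat res = pvJoinW ws ++ [' '] →
    pvCat (rest.foldl pvStepA res) = pvJoinW (rest.foldl pvStepB ws) ++ [' '] := by
  induction rest with
  | nil => intro res ws _ _ hcat; simpa using hcat
  | cons p t ih =>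
    intro res ws hws hres hcat
    by_cases hp : p = ","
    · obtain ⟨rs, rfl⟩ := hres
      have hg : PySem.List.pyGetD (rs ++ [" "]) (-1) "" = " " :=
        PySem.List.pyGetD_neg_one_append_singleton rs " " ""
      have hstepA : pvStepA (rs ++ [" "]) p = (rs ++ [","]) ++ [" "] := by
        simp [pvStepA, hp, hg, pvSetD_last]
      obtain ⟨qs, w, rfl⟩ : ∃ qs w, ws = qs ++ [w] :=
        ⟨ws.dropLast, ws.getLast hws, (List.dropLast_append_getLast hws).symm⟩
      have hgw : PySem.List.pyGetD (qs ++ [w]) (-1) "" = w :=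
        PySem.List.pyGetD_neg_one_append_singleton qs w ""
      have hstepB : pvStepB (qs ++ [w]) p = qs ++ [w ++ ","] := by
        simp [pvStepB, hp, hgw, pvSetD_last]
      have hrs : pvCat rs = pvJoinW (qs ++ [w]) := by
        have h2 := hcat
        rw [pvCat_append, show (" " : String).toList = [' '] from rfl] at h2
        exact List.append_cancel_right h2
      simp only [List.foldl_cons, hstepA, hstepB]
      apply ih
      · simp
      · exact ⟨rs ++ [","], rfl⟩
      · rw [pvCat_append, pvCat_append, hrs, pvJoinW_comma]
        simp
    · have hstepA : pvStepA res p = (res ++ [p]) ++ [" "] := by simp [pvStepA, hp]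
      have hstepB : pvStepB ws p = ws ++ [p] := by simp [pvStepB, hp]
      simp only [List.foldl_cons, hstepA, hstepB]
      apply ih
      · simp
      · exact ⟨res ++ [p], rfl⟩
      · rw [pvCat_append, pvCat_append, pvJoinW_append _ _ hws, hcat]
        simp

-- A's copy loop is a filter
lemma pv_fold_filter (cs acc : List Char) :
    cs.foldl (fun acc c => if c = '.' then acc else acc ++ [c]) acc
      = acc ++ cs.filter (fun c => c ≠ '.') := by
  have he : (fun (acc : List Char) c => if c = '.' then acc else acc ++ [c])
      = (fun acc c => if (decide (c ≠ '.')) = true then acc ++ [id c] else acc) := by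
    funext a c; by_cases h : c = '.' <;> simp [h]
  rw [he, PySem.List.foldl_append_if (fun c => decide (c ≠ '.')) id]
  simp

-- Chars.replace by a single char with "" is a filter
lemma pv_replace_go (fuel : Nat) :
    ∀ (l acc : List Char), l.length ≤ fuel →
    PySem.Chars.replace.go ['.'] [] fuel l acc
      = acc.reverse ++ l.filter (fun c => c ≠ '.') := by
  induction fuel with
  | zero =>
    intro l acc hl
    cases l with
    | nil => simp [PySem.Chars.replace.go]
    | cons c t => simp at hl
  | succ n ih =>
    intro l acc hl
    cases l with
    | nil => simp [PySem.Chars.replace.go]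
    | cons c t =>
      by_cases hc : c = '.'
      · subst hc
        have hpfx : List.isPrefixOf ['.'] ('.' :: t) = true := by simp [List.isPrefixOf]
        simp only [PySem.Chars.replace.go, hpfx, if_pos]
        simp only [List.reverse_nil, List.nil_append, List.drop_succ_cons, List.drop_zero,
          List.length_cons, List.length_nil]
        rw [ih t acc (by simp at hl; omega)]
        simp
      · have hpfx : List.isPrefixOf ['.'] (c :: t) = false := by
          simp [List.isPrefixOf]; exact fun h => absurd h.symm hc
        simp only [PySem.Chars.replace.go, hpfx]
        rw [if_neg (by simp)]
        rw [ih t (c :: acc) (by simp at hl; omega)]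
        simp [hc]

lemma pv_replace_dot (cs : List Char) :
    PySem.Chars.replace cs ['.'] [] = cs.filter (fun c => c ≠ '.') := by
  have h := pv_replace_go cs.length cs [] le_rfl
  simp only [List.reverse_nil, List.nil_append] at h
  simp [PySem.Chars.replace, h]

lemma pv_rstrip_space (x : List Char) :
    PySem.Chars.rstrip (x ++ [' ']) = PySem.Chars.rstrip x := by
  have hsp : PySem.Chars.isspace ' ' = true := by decide
  simp [PySem.Chars.rstrip, hsp]

lemma pv_strip_space (x : List Char) :
    PySem.Chars.strip (x ++ [' ']) = PySem.Chars.strip x := by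
  have hsp : PySem.Chars.isspace ' ' = true := by decide
  simp only [PySem.Chars.strip, PySem.Chars.lstrip, List.dropWhile_append]
  by_cases h : (List.dropWhile PySem.Chars.isspace x).isEmpty = true
  · rw [if_pos h]
    have hx : List.dropWhile PySem.Chars.isspace x = [] := by
      simpa [List.isEmpty_iff] using h
    rw [hx]
    simp [List.dropWhile, hsp]
  · rw [if_neg h]
    exact pv_rstrip_space _

-- ===== VERDICT (by name: the statement is the Claim_ definition above) =====
theorem make_sentences_spec : Claim_equal_make_sentences := by
  intro parts _ hpre
  unfold Spec_make_sentences
  cases parts with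
  | nil => rfl
  | cons p rest =>
    have hp : p ≠ "," := fun h => hpre (by simp [h])
    have hstepA : pvStepA [] p = [p, " "] := by simp [pvStepA, hp]
    have hstepB : pvStepB [] p = [p] := by simp [pvStepB, hp]
    have hcat := pv_loop_inv rest [p, " "] [p] (by simp) ⟨[p], rfl⟩
      (by simp [pvCat, pvJoinW, PySem.Chars.join_singleton, PySem.Chars.join_cons_cons,
            show (" " : String).toList = [' '] from rfl])
    unfold pvCat pvJoinW at hcat
    simp only [make_sentences, make_sentences_alt, List.foldl_cons, hstepA, hstepB]
    rw [PySem.Str.toList_join]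
    rw [PySem.Str.toList_strip, PySem.Str.toList_replace, PySem.Str.toList_join]
    simp only [show ("" : String).toList = [] from rfl,
      show ("." : String).toList = ['.'] from rfl,
      show (" " : String).toList = [' '] from rfl]
    rw [hcat, pv_fold_filter, pv_replace_dot, List.filter_append]
    simp [pv_strip_space, List.filter]
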